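-- pv_equiv track=rewrite | github.com/tomviner/cryptopals | cryptopals/set2/chal12.py | count_repeat_runs
-- ===== SOURCE A (Python) =====
-- def count_repeat_runs(blocks):
--     last = None
--     runs = [0]
--     for block in blocks:
--         if block == last:
--             runs[-1] += 1
--         elif runs[-1]:
--             runs.append(0)
--         last = block
--     return max(runs)
-- ===== SOURCE B (Python) =====
-- def count_repeat_runs(blocks):
--     # pass 1: materialize which positions repeat their predecessor
--     prev = None
--     eqs = []
--     for block in blocks:
--         eqs.append(block == prev)
--         prev = block
--     # pass 2: longest run of consecutive True values
--     best = cur = 0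
--     for e in eqs:
--         cur = cur + 1 if e else 0
--         if cur > best:
--             best = cur
--     return best
-- ===== Notes on version B (the rewrite author's own statement) =====
-- stated objective: simpler
-- what changed: Replaces A's interleaved runs-list bookkeeping (in-place increment of runs[-1], conditional append, max over the list at the end) with two plain passes: first materialize a boolean list of block==predecessor, then scan it for the longest run of consecutive True values.
import Mathlib
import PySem

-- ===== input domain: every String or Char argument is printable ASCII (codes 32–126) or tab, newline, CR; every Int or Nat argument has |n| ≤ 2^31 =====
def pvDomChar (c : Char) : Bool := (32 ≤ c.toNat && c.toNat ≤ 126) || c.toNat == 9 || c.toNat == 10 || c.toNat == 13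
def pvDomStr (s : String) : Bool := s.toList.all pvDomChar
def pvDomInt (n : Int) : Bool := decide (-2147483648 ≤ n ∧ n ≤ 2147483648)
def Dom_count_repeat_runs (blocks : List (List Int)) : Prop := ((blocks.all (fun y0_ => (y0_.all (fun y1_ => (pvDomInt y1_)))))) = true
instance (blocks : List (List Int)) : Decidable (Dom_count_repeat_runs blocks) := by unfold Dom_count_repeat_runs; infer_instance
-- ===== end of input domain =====

-- B replaces A's interleaved runs-list bookkeeping with two plain passes:
-- materialize the block==predecessor booleans, then scan for the longest True run (objective: simpler).

-- ===== PORT A =====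
-- runs[-1] += 1
def pvIncLast : List Int → List Int
  | [] => []
  | [r] => [r + 1]
  | r :: rest => r :: pvIncLast rest

-- runs[-1] (runs is always nonempty in A; 0 is a dummy for [])
def pvLast : List Int → Int
  | [] => 0
  | [r] => r
  | _ :: rest => pvLast rest

-- Python max() over a nonempty list (0 is a dummy for [])
def pvMax : List Int → Int
  | [] => 0
  | [x] => x
  | x :: xs => max x (pvMax xs)

def count_repeat_runs (blocks : List (List Int)) : Int :=
  let st := blocks.foldl
    (fun (st : Option (List Int) × List Int) block =>
      if some block = st.1 then (some block, pvIncLast st.2)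
      else if pvLast st.2 ≠ 0 then (some block, st.2 ++ [0])
      else (some block, st.2))
    (none, [0])
  pvMax st.2

-- ===== PORT B =====
def count_repeat_runs_alt (blocks : List (List Int)) : Int :=
  -- pass 1: eqs[i] = (blocks[i] == previous block)
  let eqs := (blocks.foldl
    (fun (st : Option (List Int) × List Bool) block =>
      (some block, st.2 ++ [decide (some block = st.1)])) (none, [])).2
  -- pass 2: longest run of consecutive True values
  let bc := eqs.foldl
    (fun (p : Int × Int) e =>
      let cur := if e then p.2 + 1 else 0
      (if cur > p.1 then cur else p.1, cur))
    (0, 0)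
  bc.1

-- ===== PRECONDITION & SPEC =====
def Spec_count_repeat_runs (blocks : List (List Int)) (out : Int) : Prop := out = count_repeat_runs_alt blocks
instance (blocks : List (List Int)) (out : Int) : Decidable (Spec_count_repeat_runs blocks out) := by unfold Spec_count_repeat_runs; infer_instance

-- ===== CLAIM (what is proved, stated in full; the proofs are below) =====
def Claim_equal_count_repeat_runs : Prop := ∀ (blocks : List (List Int)), Dom_count_repeat_runs blocks → Spec_count_repeat_runs blocks (count_repeat_runs blocks)

-- ===== LEMMAS AND PROOFS =====

-- reference recursion: longest streak, threading prev/cur/best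
def pvStreaks (prev : Option (List Int)) (cur best : Int) : List (List Int) → Int
  | [] => best
  | b :: bs =>
      let cur' := if some b = prev then cur + 1 else 0
      pvStreaks (some b) cur' (max best cur') bs

-- the boolean list B's first pass produces
def pvEqs (prev : Option (List Int)) : List (List Int) → List Bool
  | [] => []
  | b :: bs => decide (some b = prev) :: pvEqs (some b) bs

lemma pvEqs_fold (bs : List (List Int)) : ∀ (prev : Option (List Int)) (acc : List Bool),
    (bs.foldl (fun (st : Option (List Int) × List Bool) block =>
      (some block, st.2 ++ [decide (some block = st.1)])) (prev, acc)).2 = acc ++ pvEqs prev bs := by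
  induction bs with
  | nil => intro prev acc; simp [pvEqs]
  | cons b bs ih => intro prev acc; simp [List.foldl, pvEqs, ih]

lemma pvScan_fold (bs : List (List Int)) : ∀ (prev : Option (List Int)) (cur best : Int),
    ((pvEqs prev bs).foldl (fun (p : Int × Int) e =>
        let cur := if e then p.2 + 1 else 0
        (if cur > p.1 then cur else p.1, cur)) (best, cur)).1 = pvStreaks prev cur best bs := by
  induction bs with
  | nil => intro prev cur best; simp [pvEqs, pvStreaks]
  | cons b bs ih =>
    intro prev cur best
    by_cases h : some b = prev
    · simp only [pvEqs, pvStreaks, List.foldl, h, decide_true, if_true]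
      rw [show (if cur + 1 > best then cur + 1 else best) = max best (cur + 1) from by omega]
      exact ih _ _ _
    · simp only [pvEqs, pvStreaks, List.foldl, h, decide_false, Bool.false_eq_true, if_false]
      rw [show (if (0 : Int) > best then (0 : Int) else best) = max best 0 from by omega]
      exact ih _ _ _

lemma pvIncLast_ne_nil (l : List Int) (h : l ≠ []) : pvIncLast l ≠ [] := by
  cases l with
  | nil => exact absurd rfl h
  | cons r t => cases t <;> simp [pvIncLast]

lemma pvLast_cons (r : Int) (l : List Int) (h : l ≠ []) : pvLast (r :: l) = pvLast l := by
  cases l with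
  | nil => exact absurd rfl h
  | cons s t => rfl

lemma pvMax_cons (r : Int) (l : List Int) (h : l ≠ []) : pvMax (r :: l) = max r (pvMax l) := by
  cases l with
  | nil => exact absurd rfl h
  | cons s t => rfl

lemma pvIncLast_cons (r : Int) (l : List Int) (h : l ≠ []) : pvIncLast (r :: l) = r :: pvIncLast l := by
  cases l with
  | nil => exact absurd rfl h
  | cons s t => rfl

lemma pvLast_incLast (runs : List Int) (h : runs ≠ []) : pvLast (pvIncLast runs) = pvLast runs + 1 := by
  induction runs with
  | nil => exact absurd rfl h
  | cons r rest ih =>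
    cases rest with
    | nil => simp [pvIncLast, pvLast]
    | cons s t =>
      rw [pvIncLast_cons r _ (by simp), pvLast_cons r _ (pvIncLast_ne_nil _ (by simp)),
        pvLast_cons r _ (by simp)]
      exact ih (by simp)

lemma pvMax_incLast (runs : List Int) (h : runs ≠ []) :
    pvMax (pvIncLast runs) = max (pvMax runs) (pvLast runs + 1) := by
  induction runs with
  | nil => exact absurd rfl h
  | cons r rest ih =>
    cases rest with
    | nil => simp [pvIncLast, pvLast, pvMax]
    | cons s t =>
      rw [pvIncLast_cons r _ (by simp), pvMax_cons r _ (pvIncLast_ne_nil _ (by simp)),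
        pvMax_cons r _ (by simp), pvLast_cons r _ (by simp), ih (by simp)]
      omega

lemma pvMax_append_zero (runs : List Int) (h : runs ≠ []) :
    pvMax (runs ++ [0]) = max (pvMax runs) 0 := by
  induction runs with
  | nil => exact absurd rfl h
  | cons r rest ih =>
    cases rest with
    | nil => simp [pvMax]
    | cons s t =>
      rw [List.cons_append, pvMax_cons r _ (by simp), pvMax_cons r _ (by simp), ih (by simp)]
      omega

lemma pvLast_append_zero (runs : List Int) : pvLast (runs ++ [0]) = 0 := by
  induction runs with
  | nil => simp [pvLast]
  | cons r rest ih =>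
    rw [List.cons_append, pvLast_cons r _ (by simp)]
    exact ih

lemma pvLast_le_pvMax (runs : List Int) : pvLast runs ≤ pvMax runs := by
  induction runs with
  | nil => simp [pvLast, pvMax]
  | cons r rest ih =>
    cases rest with
    | nil => simp [pvLast, pvMax]
    | cons s t =>
      rw [pvLast_cons r _ (by simp), pvMax_cons r _ (by simp)]
      omega

lemma pvA_loop (bs : List (List Int)) : ∀ (prev : Option (List Int)) (runs : List Int),
    runs ≠ [] →
    pvMax (bs.foldl
      (fun (st : Option (List Int) × List Int) block =>
        if some block = st.1 then (some block, pvIncLast st.2)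
        else if pvLast st.2 ≠ 0 then (some block, st.2 ++ [0])
        else (some block, st.2))
      (prev, runs)).2 = pvStreaks prev (pvLast runs) (pvMax runs) bs := by
  induction bs with
  | nil => intro prev runs h; simp [pvStreaks]
  | cons b bs ih =>
    intro prev runs h
    simp only [List.foldl, pvStreaks]
    by_cases he : some b = prev
    · simp only [if_pos he]
      rw [ih _ _ (pvIncLast_ne_nil _ h), pvLast_incLast _ h, pvMax_incLast _ h]
    · simp only [if_neg he]
      by_cases hz : pvLast runs ≠ 0
      · simp only [if_pos hz]
        rw [ih _ _ (by simp), pvLast_append_zero, pvMax_append_zero _ h]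
      · simp only [if_neg hz]
        rw [ih _ _ h]
        have hz0 : pvLast runs = 0 := not_ne_iff.mp hz
        have := pvLast_le_pvMax runs
        rw [hz0] at this
        rw [hz0]
        congr 1
        omega

-- ===== VERDICT (by name: the statement is the Claim_ definition above) =====
theorem count_repeat_runs_spec : Claim_equal_count_repeat_runs := by
  intro blocks _
  unfold Spec_count_repeat_runs count_repeat_runs count_repeat_runs_alt
  simp only []
  rw [pvEqs_fold, List.nil_append, pvScan_fold, pvA_loop blocks none [0] (by simp)]
  simp [pvLast, pvMax]
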